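-- pv_equiv track=rewrite | github.com/suhrobshb/process_13 | ai_engine/task_detection.py | detect_tasks
-- ===== SOURCE A (Python) =====
-- from typing import List, Dict
--
-- def detect_tasks(events: List[Dict]) -> List[Dict]:
--     clusters: List[Dict] = []
--     current: List[Dict] = []
--     last_ts = None
--     for ev in events:
--         if last_ts and ev["timestamp"] - last_ts > 30:
--             # split if >30s of idle
--             clusters.append({"events": current})
--             current = []
--         current.append(ev)
--         last_ts = ev["timestamp"]
--     if current:
--         clusters.append({"events": current})
--     return clusters
-- ===== SOURCE B (Python) =====
-- from typing import List, Dict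
--
-- def detect_tasks(events: List[Dict]) -> List[Dict]:
--     n = len(events)
--     cuts = [i for i in range(1, n)
--             if events[i - 1]["timestamp"] and events[i]["timestamp"] - events[i - 1]["timestamp"] > 30]
--     bounds = [0] + cuts + [n]
--     return [{"events": events[a:b]} for a, b in zip(bounds, bounds[1:]) if events[a:b]]
-- ===== Notes on version B (the rewrite author's own statement) =====
-- stated objective: alternative
-- what changed: B replaces A's single stateful scan (clusters/current/last_ts accumulators with a trailing flush) by a two-phase decomposition: first compute the list of cut indices where a >30s idle gap (with truthy previous timestamp) occurs, then partition the event list into contiguous slices at those cuts and wrap each non-empty slice. Pre_ excludes events lacking a 'timestamp' key, on which A raises KeyError.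
import Mathlib
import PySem

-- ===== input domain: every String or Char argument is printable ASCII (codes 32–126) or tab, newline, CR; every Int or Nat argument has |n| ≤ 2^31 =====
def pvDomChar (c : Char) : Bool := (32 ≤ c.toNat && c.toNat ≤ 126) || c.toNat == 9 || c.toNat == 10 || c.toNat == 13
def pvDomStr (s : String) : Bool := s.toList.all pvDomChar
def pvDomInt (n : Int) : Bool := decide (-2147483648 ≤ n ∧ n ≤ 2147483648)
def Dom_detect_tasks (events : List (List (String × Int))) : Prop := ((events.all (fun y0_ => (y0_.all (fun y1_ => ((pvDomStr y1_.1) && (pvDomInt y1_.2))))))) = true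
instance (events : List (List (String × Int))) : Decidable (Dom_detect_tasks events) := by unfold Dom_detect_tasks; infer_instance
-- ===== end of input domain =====

-- B recomputes A's clustering by a different decomposition: cut indices first, then slicing; not faster.
-- Pre_ excludes inputs where some event lacks the "timestamp" key (A raises KeyError there).

-- ev["timestamp"] (exact under Pre_: the key is present; assoc-list lookup = first match)
def tsOf (ev : List (String × Int)) : Int := ((List.lookup "timestamp" ev).getD 0)

-- ===== PORT A =====
-- the loop body of A's for-loop; state = (clusters, current, last_ts)
def stepA (st : List (List (String × List (List (String × Int)))) × List (List (String × Int)) × Option Int)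
    (ev : List (String × Int)) :
    List (List (String × List (List (String × Int)))) × List (List (String × Int)) × Option Int :=
  let cond := match st.2.2 with
    | none => false                     -- `if last_ts and …`: None is falsy
    | some t => t != 0 && decide (tsOf ev - t > 30)
  let cc := if cond then (st.1 ++ [[("events", st.2.1)]], ([] : List (List (String × Int)))) else (st.1, st.2.1)
  (cc.1, cc.2 ++ [ev], some (tsOf ev))

def detect_tasks (events : List (List (String × Int))) : List (List (String × List (List (String × Int)))) :=
  let s := events.foldl stepA ([], [], none)
  if s.2.1.isEmpty then s.1 else s.1 ++ [[("events", s.2.1)]]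

-- ===== PORT B =====
-- the comprehension condition producing the cut indices
def cutP (events : List (List (String × Int))) (i : Int) : Bool :=
  tsOf (PySem.List.pyGetD events (i - 1) []) != 0 &&
  decide (tsOf (PySem.List.pyGetD events i []) - tsOf (PySem.List.pyGetD events (i - 1) []) > 30)

-- the final comprehension: wrap each non-empty slice events[a:b] for consecutive bounds (a, b)
def sliceClusters (events : List (List (String × Int))) (bounds : List Int) :
    List (List (String × List (List (String × Int)))) :=
  ((bounds.zip (PySem.List.slice bounds (some 1) none)).filter
      (fun p => !(PySem.List.slice events (some p.1) (some p.2)).isEmpty)).map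
    (fun p => [("events", PySem.List.slice events (some p.1) (some p.2))])

def detect_tasks_alt (events : List (List (String × Int))) : List (List (String × List (List (String × Int)))) :=
  let n : Int := events.length
  let cuts := (PySem.List.pyRange 1 n 1).filter (cutP events)
  let bounds := 0 :: (cuts ++ [n])
  sliceClusters events bounds

-- ===== PRECONDITION & SPEC =====
-- Pre_ excludes exactly the inputs on which A raises KeyError: an event without the "timestamp" key.
def Pre_detect_tasks (events : List (List (String × Int))) : Prop :=
  ∀ ev ∈ events, (List.lookup "timestamp" ev).isSome = true
instance (events : List (List (String × Int))) : Decidable (Pre_detect_tasks events) := by unfold Pre_detect_tasks; infer_instance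
def pvWitness_detect_tasks : (List (List (String × Int))) := [[("timestamp", 1)], [("timestamp", 50)]]

def Spec_detect_tasks (events : List (List (String × Int))) (out : List (List (String × List (List (String × Int))))) : Prop := out = detect_tasks_alt events
instance (events : List (List (String × Int))) (out : List (List (String × List (List (String × Int))))) : Decidable (Spec_detect_tasks events out) := by unfold Spec_detect_tasks; infer_instance

-- ===== CLAIM (what is proved, stated in full; the proofs are below) =====
def Claim_equal_detect_tasks : Prop := ∀ (events : List (List (String × Int))), Dom_detect_tasks events → Pre_detect_tasks events → Spec_detect_tasks events (detect_tasks events)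

-- ===== LEMMAS AND PROOFS =====

-- the common mathematical description: the list of chunks, split before e when the gap from the
-- previous timestamp t is > 30 and t is truthy
def chunksGo (cur : List (List (String × Int))) (t : Int) :
    List (List (String × Int)) → List (List (List (String × Int)))
  | [] => [cur]
  | e :: rest =>
    if t != 0 && decide (tsOf e - t > 30) then cur :: chunksGo [e] (tsOf e) rest
    else chunksGo (cur ++ [e]) (tsOf e) rest

def chunks : List (List (String × Int)) → List (List (List (String × Int)))
  | [] => []
  | e :: rest => chunksGo [e] (tsOf e) rest

def wrapC (g : List (List (String × Int))) : List (String × List (List (String × Int))) := [("events", g)]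

-- ---- A side ----
theorem foldA (rest : List (List (String × Int)))
    (cl : List (List (String × List (List (String × Int))))) (cur : List (List (String × Int))) (t : Int)
    (h : cur ≠ []) :
    (let s := rest.foldl stepA (cl, cur, some t);
     if s.2.1.isEmpty then s.1 else s.1 ++ [[("events", s.2.1)]]) =
      cl ++ (chunksGo cur t rest).map wrapC := by
  induction rest generalizing cl cur t with
  | nil => simp [chunksGo, wrapC, h]
  | cons e rest ih =>
    by_cases hc : (t != 0 && decide (tsOf e - t > 30)) = true
    · simp only [List.foldl_cons, stepA, hc, if_true, chunksGo, List.nil_append]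
      simpa [wrapC] using ih (cl ++ [[("events", cur)]]) [e] (tsOf e) (by simp)
    · simp only [List.foldl_cons, stepA, chunksGo, hc, if_false, Bool.false_eq_true]
      simpa using ih cl (cur ++ [e]) (tsOf e) (by simp [h])

theorem detectA (events : List (List (String × Int))) :
    detect_tasks events = (chunks events).map wrapC := by
  cases events with
  | nil => rfl
  | cons e rest =>
    show (let s := (e :: rest).foldl stepA ([], [], none);
          if s.2.1.isEmpty then s.1 else s.1 ++ [[("events", s.2.1)]]) = _
    rw [List.foldl_cons]
    have hstep : stepA ([], [], none) e = ([], [e], some (tsOf e)) := rfl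
    rw [hstep]
    simpa [chunks] using foldA rest [] [e] (tsOf e) (by simp)

-- ---- B side ----
theorem pyGetD_cons_succ (e : List (String × Int)) (tail : List (List (String × Int))) (j : Int)
    (hj : 0 ≤ j) : PySem.List.pyGetD (e :: tail) (j + 1) [] = PySem.List.pyGetD tail j [] := by
  obtain ⟨m, rfl⟩ : ∃ m : ℕ, j = (m : Int) := ⟨j.toNat, by omega⟩
  rw [show (m : Int) + 1 = ((m + 1 : ℕ) : Int) by push_cast; ring,
    PySem.List.pyGetD_natCast, PySem.List.pyGetD_natCast, List.getD_cons_succ]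

theorem cutP_shift (e : List (String × Int)) (tail : List (List (String × Int))) (i : Int)
    (hi : 1 ≤ i) : cutP (e :: tail) (i + 1) = cutP tail i := by
  have h1 : PySem.List.pyGetD (e :: tail) i [] = PySem.List.pyGetD tail (i - 1) [] := by
    have := pyGetD_cons_succ e tail (i - 1) (by omega)
    simpa using this
  have h2 : PySem.List.pyGetD (e :: tail) (i + 1) [] = PySem.List.pyGetD tail i [] :=
    pyGetD_cons_succ e tail i (by omega)
  simp [cutP, h1, h2, show i + 1 - 1 = i by ring]

theorem cuts_shift (e e1 : List (String × Int)) (rest : List (List (String × Int))) :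
    (PySem.List.pyRange 1 ((e :: e1 :: rest).length : Int) 1).filter (cutP (e :: e1 :: rest)) =
      (if (tsOf e != 0 && decide (tsOf e1 - tsOf e > 30)) = true then [(1 : Int)] else []) ++
        ((PySem.List.pyRange 1 (((e1 :: rest) : List _).length : Int) 1).filter
            (cutP (e1 :: rest))).map (· + 1) := by
  have hn : ((e :: e1 :: rest).length : Int) = ((e1 :: rest).length : Int) + 1 := by
    push_cast [List.length_cons]; ring
  have hn1 : (1 : Int) ≤ ((e1 :: rest).length : Int) := by
    have := List.length_pos_of_ne_nil (l := e1 :: rest) (by simp)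
    omega
  rw [hn, PySem.List.pyRange_one_cons (by omega)]
  have hmap : PySem.List.pyRange (1 + 1) (((e1 :: rest).length : Int) + 1) 1 =
      (PySem.List.pyRange 1 ((e1 :: rest).length : Int) 1).map (· + 1) := by
    rw [PySem.List.pyRange_one, PySem.List.pyRange_one, List.map_map]
    rw [show ((e1 :: rest).length : Int) + 1 - (1 + 1) = ((e1 :: rest).length : Int) - 1 by ring]
    apply List.map_congr_left
    intro k _
    simp only [Function.comp_apply]
    ring
  have hcut1 : cutP (e :: e1 :: rest) 1 = (tsOf e != 0 && decide (tsOf e1 - tsOf e > 30)) := by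
    have h0 : PySem.List.pyGetD (e :: e1 :: rest) (0 : Int) [] = e := by
      exact PySem.List.pyGetD_zero_cons e (e1 :: rest) []
    have h1 : PySem.List.pyGetD (e :: e1 :: rest) (1 : Int) [] = e1 := by
      have := pyGetD_cons_succ e (e1 :: rest) 0 (by omega)
      simp only [zero_add] at this
      rw [this]
      exact PySem.List.pyGetD_zero_cons e1 rest []
    simp [cutP, h0, h1]
  rw [List.filter_cons, hcut1, hmap, List.filter_map]
  have hfc : ∀ i ∈ PySem.List.pyRange 1 ((e1 :: rest).length : Int) 1,
      (cutP (e :: e1 :: rest) ∘ (· + 1)) i = cutP (e1 :: rest) i := by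
    intro i hi
    have : 1 ≤ i := (PySem.List.mem_pyRange_one.mp hi).1
    simpa using cutP_shift e (e1 :: rest) i this
  rw [List.filter_congr hfc]
  by_cases hc : (tsOf e != 0 && decide (tsOf e1 - tsOf e > 30)) = true <;> simp [hc]

theorem slice_cons_shift (e : List (String × Int)) (tail : List (List (String × Int))) (a b : Int)
    (ha : 0 ≤ a) (hb : 0 ≤ b) :
    PySem.List.slice (e :: tail) (some (a + 1)) (some (b + 1)) = PySem.List.slice tail (some a) (some b) := by
  rw [PySem.List.slice_toNat _ (by omega) (by omega),
    PySem.List.slice_toNat _ ha hb,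
    show (a + 1).toNat = a.toNat + 1 by omega, show (b + 1).toNat = b.toNat + 1 by omega]
  simp

theorem sliceClusters_cons (l : List (List (String × Int))) (a b : Int) (bs : List Int) :
    sliceClusters l (a :: b :: bs) =
      (if (PySem.List.slice l (some a) (some b)).isEmpty then []
       else [[("events", PySem.List.slice l (some a) (some b))]]) ++ sliceClusters l (b :: bs) := by
  simp only [sliceClusters, PySem.List.slice_from_one, List.tail_cons, List.zip_cons_cons,
    List.filter_cons]
  by_cases hp : (PySem.List.slice l (some a) (some b)).isEmpty <;> simp [hp]

theorem sliceClusters_shift (e : List (String × Int)) (tail : List (List (String × Int)))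
    (bs : List Int) (h : ∀ x ∈ bs, 0 ≤ x) :
    sliceClusters (e :: tail) (bs.map (· + 1)) = sliceClusters tail bs := by
  simp only [sliceClusters, PySem.List.slice_from_one, ← List.map_tail,
    List.zip_map, List.filter_map]
  have hfc : ∀ q ∈ bs.zip bs.tail,
      ((fun p => !(PySem.List.slice (e :: tail) (some p.1) (some p.2)).isEmpty) ∘
        Prod.map (· + 1) (· + 1)) q =
      (fun p => !(PySem.List.slice tail (some p.1) (some p.2)).isEmpty) q := by
    intro q hq
    obtain ⟨q1, q2⟩ := q
    obtain ⟨hq1, hq2⟩ := List.of_mem_zip hq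
    simp [Prod.map, slice_cons_shift e tail q1 q2 (h _ hq1) (h _ (List.mem_of_mem_tail hq2))]
  rw [List.filter_congr hfc, List.map_map]
  apply List.map_congr_left
  intro q hq
  obtain ⟨q1, q2⟩ := q
  obtain ⟨hq1, hq2⟩ := List.of_mem_zip (List.mem_of_mem_filter hq)
  simp [Prod.map, slice_cons_shift e tail q1 q2 (h _ hq1) (h _ (List.mem_of_mem_tail hq2))]

theorem chunksGo_ne_nil (l : List (List (String × Int))) (cur : List (List (String × Int))) (t : Int) :
    chunksGo cur t l ≠ [] := by
  induction l generalizing cur t with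
  | nil => simp [chunksGo]
  | cons e rest ih =>
    by_cases hc : (t != 0 && decide (tsOf e - t > 30)) = true <;> simp [chunksGo, hc, ih]

theorem chunksGo_prepend (l : List (List (String × Int))) (cur c₀ : List (List (String × Int))) (t : Int) :
    chunksGo (c₀ ++ cur) t l = (c₀ ++ (chunksGo cur t l).headI) :: (chunksGo cur t l).tail := by
  induction l generalizing cur t c₀ with
  | nil => simp [chunksGo]
  | cons e rest ih =>
    by_cases hc : (t != 0 && decide (tsOf e - t > 30)) = true
    · simp [chunksGo, hc]
    · simp only [chunksGo, hc, if_false, Bool.false_eq_true, List.append_assoc]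
      apply ih

theorem detectB (events : List (List (String × Int))) :
    detect_tasks_alt events = (chunks events).map wrapC := by
  induction events with
  | nil => rfl
  | cons e tail ih =>
    cases tail with
    | nil =>
      have h01 : PySem.List.slice [e] (some (0 : Int)) (some (1 : Int)) = [e] := by
        rw [PySem.List.slice_toNat _ (by omega) (by omega)]
        simp
      have hrange : PySem.List.pyRange 1 (([e].length : Int)) 1 = [] := by
        simp [PySem.List.pyRange_one_eq_nil (le_refl (1 : Int))]
      simp only [detect_tasks_alt, hrange, List.filter_nil, List.nil_append]
      rw [show (([e].length : Int)) = (1 : Int) by simp]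
      rw [sliceClusters_cons, h01]
      simp [sliceClusters, chunks, chunksGo, wrapC, PySem.List.slice_from_one]
    | cons e1 rest =>
      have hn1 : (1 : Int) ≤ ((e1 :: rest).length : Int) := by
        push_cast [List.length_cons]; omega
      have hn : (((e :: e1 :: rest).length : Int)) = ((e1 :: rest).length : Int) + 1 := by
        push_cast [List.length_cons]; ring
      have hbt : ∀ x ∈ ((PySem.List.pyRange 1 ((e1 :: rest).length : Int) 1).filter
          (cutP (e1 :: rest)) ++ [((e1 :: rest).length : Int)]), 0 ≤ x := by
        intro x hx
        rcases List.mem_append.mp hx with hx | hx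
        · have := (PySem.List.mem_pyRange_one.mp (List.mem_of_mem_filter hx)).1; omega
        · simp only [List.mem_singleton] at hx; omega
      simp only [detect_tasks_alt]
      rw [cuts_shift e e1 rest, hn]
      rw [show ((if (tsOf e != 0 && decide (tsOf e1 - tsOf e > 30)) = true then [(1 : Int)] else []) ++
            ((PySem.List.pyRange 1 ((e1 :: rest).length : Int) 1).filter (cutP (e1 :: rest))).map (· + 1)) ++
            [((e1 :: rest).length : Int) + 1] =
          (if (tsOf e != 0 && decide (tsOf e1 - tsOf e > 30)) = true then [(1 : Int)] else []) ++
            (((PySem.List.pyRange 1 ((e1 :: rest).length : Int) 1).filter (cutP (e1 :: rest)) ++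
              [((e1 :: rest).length : Int)]).map (· + 1)) by
        simp [List.map_append, List.append_assoc]]
      by_cases hc : (tsOf e != 0 && decide (tsOf e1 - tsOf e > 30)) = true
      · -- A splits right after e
        rw [if_pos hc]
        have h01 : PySem.List.slice (e :: e1 :: rest) (some (0 : Int)) (some (1 : Int)) = [e] := by
          rw [PySem.List.slice_toNat _ (by omega) (by omega)]
          simp
        rw [List.singleton_append, sliceClusters_cons, h01]
        rw [show ((1 : Int) :: (((PySem.List.pyRange 1 ((e1 :: rest).length : Int) 1).filter (cutP (e1 :: rest)) ++
              [((e1 :: rest).length : Int)]).map (· + 1))) =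
            (((0 : Int) :: ((PySem.List.pyRange 1 ((e1 :: rest).length : Int) 1).filter (cutP (e1 :: rest)) ++
              [((e1 :: rest).length : Int)])).map (· + 1)) by simp]
        rw [sliceClusters_shift e (e1 :: rest) _ (by
          intro x hx
          rcases List.mem_cons.mp hx with hx | hx
          · omega
          · exact hbt x hx)]
        have halt : detect_tasks_alt (e1 :: rest) = sliceClusters (e1 :: rest)
            ((0 : Int) :: ((PySem.List.pyRange 1 ((e1 :: rest).length : Int) 1).filter (cutP (e1 :: rest)) ++
              [((e1 :: rest).length : Int)])) := by
          simp only [detect_tasks_alt]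
        rw [← halt, ih]
        simp [chunks, chunksGo, hc, wrapC]
      · -- e joins the first chunk of the tail
        rw [if_neg hc, List.nil_append]
        obtain ⟨c₁, bt', hbteq⟩ := List.exists_cons_of_ne_nil
          (show (PySem.List.pyRange 1 ((e1 :: rest).length : Int) 1).filter (cutP (e1 :: rest)) ++
            [((e1 :: rest).length : Int)] ≠ [] by simp)
        have hc₁ : 1 ≤ c₁ := by
          have hc₁mem : c₁ ∈ (PySem.List.pyRange 1 ((e1 :: rest).length : Int) 1).filter (cutP (e1 :: rest)) ++
              [((e1 :: rest).length : Int)] := by rw [hbteq]; exact List.mem_cons_self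
          rcases List.mem_append.mp hc₁mem with h' | h'
          · exact (PySem.List.mem_pyRange_one.mp (List.mem_of_mem_filter h')).1
          · simp only [List.mem_singleton] at h'; omega
        have hbt' : ∀ x ∈ c₁ :: bt', 0 ≤ x := by rw [← hbteq]; exact hbt
        rw [hbteq, List.map_cons, sliceClusters_cons]
        have hsl : PySem.List.slice (e :: e1 :: rest) (some (0 : Int)) (some (c₁ + 1)) =
            e :: List.take c₁.toNat (e1 :: rest) := by
          rw [PySem.List.slice_toNat _ (by omega) (by omega)]
          simp [show (c₁ + 1).toNat = c₁.toNat + 1 by omega]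
        rw [hsl]
        rw [show ((c₁ + 1) :: bt'.map (· + 1)) = ((c₁ :: bt').map (· + 1)) by simp]
        rw [sliceClusters_shift e (e1 :: rest) _ hbt']
        -- analyse the tail's value via ih
        have hi2 : ([("events", List.take c₁.toNat (e1 :: rest))] :: sliceClusters (e1 :: rest) (c₁ :: bt')) =
            (chunks (e1 :: rest)).map wrapC := by
          rw [← ih]
          simp only [detect_tasks_alt]
          rw [hbteq, sliceClusters_cons]
          have hsl2 : PySem.List.slice (e1 :: rest) (some (0 : Int)) (some c₁) =
              List.take c₁.toNat (e1 :: rest) := by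
            rw [PySem.List.slice_toNat _ (by omega) (by omega)]
            simp
          obtain ⟨k, hk⟩ : ∃ k, c₁.toNat = k + 1 := ⟨c₁.toNat - 1, by omega⟩
          rw [hsl2, hk, List.take_succ_cons]
          simp
        obtain ⟨g, gs, hgg⟩ := List.exists_cons_of_ne_nil (chunksGo_ne_nil rest [e1] (tsOf e1))
        have hch : chunks (e1 :: rest) = g :: gs := by simp only [chunks]; exact hgg
        rw [hch, List.map_cons] at hi2
        obtain ⟨hg1, hg2⟩ := List.cons_eq_cons.mp hi2
        have hg : g = List.take c₁.toNat (e1 :: rest) := by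
          simpa [wrapC] using hg1.symm
        -- right-hand side
        have hrhs : chunks (e :: e1 :: rest) = (e :: g) :: gs := by
          have h0 : chunks (e :: e1 :: rest) = chunksGo ([e] ++ [e1]) (tsOf e1) rest := by
            simp only [chunks, chunksGo, hc, if_false, Bool.false_eq_true]
          rw [h0, chunksGo_prepend, hgg]
          simp
        rw [hrhs, List.map_cons, ← hg2, hg]
        simp [wrapC]


-- ===== VERDICT (by name: the statement is the Claim_ definition above) =====
theorem detect_tasks_spec : Claim_equal_detect_tasks := by
  intro events _ _
  show detect_tasks events = detect_tasks_alt events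
  rw [detectA, detectB]
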